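-- pv_equiv track=rewrite | github.com/rhan75/MeetOrganizer | src/skate/utils.py | get_heat_schedule
-- ===== SOURCE A (Python) =====
-- def get_heat_schedule(lines: list) -> list:  # Checked
--     '''
--     From the schedule import file
--     Construct heat info
--     '''
--     heat = []
--     heats = []
--     for line in lines:
--         if '#' not in line:
--             heat.append(line)
--         else:
--             heats.append(heat)
--             heat = []
--     return heats
-- ===== SOURCE B (Python) =====
-- def get_heat_schedule(lines: list) -> list:
--     '''
--     From the schedule import file
--     Construct heat info
--     '''
--     heats = []
--     rest = lines
--     while True:
--         for j, line in enumerate(rest):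
--             if '#' in line:
--                 heats.append(rest[:j])
--                 rest = rest[j + 1:]
--                 break
--         else:
--             return heats
-- ===== Notes on version B (the rewrite author's own statement) =====
-- stated objective: alternative
-- what changed: Instead of growing each heat line-by-line with a pending accumulator, B repeatedly finds the next '#' delimiter and slices the whole segment before it off the remaining list (lines after the last '#' are naturally never emitted).
import Mathlib
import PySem

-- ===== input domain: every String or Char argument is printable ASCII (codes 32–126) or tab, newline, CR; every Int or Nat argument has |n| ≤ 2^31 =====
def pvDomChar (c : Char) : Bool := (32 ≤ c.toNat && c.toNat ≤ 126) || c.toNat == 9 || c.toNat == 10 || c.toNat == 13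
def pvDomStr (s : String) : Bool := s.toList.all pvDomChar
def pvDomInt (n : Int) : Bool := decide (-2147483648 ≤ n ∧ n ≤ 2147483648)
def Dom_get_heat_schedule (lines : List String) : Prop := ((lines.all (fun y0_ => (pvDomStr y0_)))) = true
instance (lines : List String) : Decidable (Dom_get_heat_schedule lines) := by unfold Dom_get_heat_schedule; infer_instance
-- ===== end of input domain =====

-- B groups lines into heats by repeatedly slicing the remaining list at the next '#' delimiter,
-- instead of growing each heat line-by-line with a pending accumulator (objective: alternative decomposition).

-- ===== PORT A =====
-- A: one fold over the lines carrying (heat, heats); a line containing '#' flushes the pending heat.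
def get_heat_schedule (lines : List String) : List (List String) :=
  (lines.foldl
    (fun (acc : List String × List (List String)) line =>
      if PySem.Str.isIn "#" line = false then (acc.1 ++ [line], acc.2)
      else ([], acc.2 ++ [acc.1]))
    ([], [])).2

-- ===== PORT B =====
-- termination helper for the while-loop port (cited by its decreasing_by)
theorem pv_findIdx_lt {p : String → Bool} {rest : List String} {j : Nat}
    (h : rest.findIdx? p = some j) : j < rest.length := by
  induction rest generalizing j with
  | nil => simp [List.findIdx?_nil] at h
  | cons x xs ih =>
    rw [List.findIdx?_cons] at h
    by_cases hp : p x
    · simp [hp] at h; simp; omega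
    · simp [hp] at h
      obtain ⟨i, hi, rfl⟩ := h
      have := ih hi
      simp; omega

-- B's while-loop: each iteration's inner 'for j, line in enumerate(rest): … break / else return'
-- is the search for the FIRST index of rest containing '#' (ported as findIdx?);
-- rest[:j] = take j and rest[j+1:] = drop (j+1), exact since 0 ≤ j < len(rest).
def pvAltLoop (rest : List String) (heats : List (List String)) : List (List String) :=
  match _h : rest.findIdx? (fun line => PySem.Str.isIn "#" line) with
  | none => heats
  | some j => pvAltLoop (rest.drop (j + 1)) (heats ++ [rest.take j])
termination_by rest.length
decreasing_by
  have := pv_findIdx_lt _h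
  simp [List.length_drop]; omega

def get_heat_schedule_alt (lines : List String) : List (List String) :=
  pvAltLoop lines []

-- ===== PRECONDITION & SPEC =====
def Spec_get_heat_schedule (lines : List String) (out : List (List String)) : Prop := out = get_heat_schedule_alt lines
instance (lines : List String) (out : List (List String)) : Decidable (Spec_get_heat_schedule lines out) := by unfold Spec_get_heat_schedule; infer_instance

-- ===== CLAIM (what is proved, stated in full; the proofs are below) =====
def Claim_equal_get_heat_schedule : Prop := ∀ (lines : List String), Dom_get_heat_schedule lines → Spec_get_heat_schedule lines (get_heat_schedule lines)

-- ===== LEMMAS AND PROOFS =====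

-- one-step unfolding of pvAltLoop as a plain (non-dependent) match
theorem pvAltLoop_eq (rest : List String) (heats : List (List String)) :
    pvAltLoop rest heats =
    (match rest.findIdx? (fun line => PySem.Str.isIn "#" line) with
     | none => heats
     | some j => pvAltLoop (rest.drop (j + 1)) (heats ++ [rest.take j])) := by
  conv_lhs => rw [pvAltLoop]
  split <;> rename_i hfi <;> rw [hfi]

-- the value of B's loop when a pending heat (A's accumulator) is prepended to the next segment
def pvSeg (rest : List String) (heat : List String) (heats : List (List String)) : List (List String) :=
  match rest.findIdx? (fun line => PySem.Str.isIn "#" line) with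
  | none => heats
  | some j => pvAltLoop (rest.drop (j + 1)) (heats ++ [heat ++ rest.take j])

theorem pvAltLoop_eq_pvSeg (rest : List String) (heats : List (List String)) :
    pvAltLoop rest heats = pvSeg rest [] heats := by
  rw [pvAltLoop_eq]
  unfold pvSeg
  cases hfi : rest.findIdx? (fun line => PySem.Str.isIn "#" line) with
  | none => simp
  | some j => simp

theorem pvSeg_cons_pos {l : String} (hp : PySem.Str.isIn "#" l = true)
    (ls : List String) (heat : List String) (heats : List (List String)) :
    pvSeg (l :: ls) heat heats = pvSeg ls [] (heats ++ [heat]) := by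
  unfold pvSeg
  rw [List.findIdx?_cons]
  simp only [hp, if_true]
  simp only [List.drop_succ_cons, List.drop_zero, List.take_zero, List.append_nil]
  rw [pvAltLoop_eq]
  cases hfi : ls.findIdx? (fun line => PySem.Str.isIn "#" line) with
  | none => simp
  | some j => simp

theorem pvSeg_cons_neg {l : String} (hp : PySem.Str.isIn "#" l = false)
    (ls : List String) (heat : List String) (heats : List (List String)) :
    pvSeg (l :: ls) heat heats = pvSeg ls (heat ++ [l]) heats := by
  unfold pvSeg
  rw [List.findIdx?_cons]
  simp only [hp, Bool.false_eq_true, if_false]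
  cases hfi : ls.findIdx? (fun line => PySem.Str.isIn "#" line) with
  | none => simp
  | some j => simp

-- Invariant: A's fold from state (heat, heats) computes B's loop with the pending heat prepended.
theorem pv_fold_eq_loop (rest : List String) (heat : List String) (heats : List (List String)) :
    (rest.foldl
      (fun (acc : List String × List (List String)) line =>
        if PySem.Str.isIn "#" line = false then (acc.1 ++ [line], acc.2)
        else ([], acc.2 ++ [acc.1]))
      (heat, heats)).2 = pvSeg rest heat heats := by
  induction rest generalizing heat heats with
  | nil => simp [pvSeg, List.findIdx?_nil]
  | cons l ls ih =>
    rw [List.foldl_cons]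
    by_cases hp : PySem.Str.isIn "#" l = true
    · simp only [hp, Bool.true_eq_false, if_false]
      rw [ih, pvSeg_cons_pos hp]
    · have hp' : PySem.Str.isIn "#" l = false := by
        cases hb : PySem.Str.isIn "#" l <;> simp_all
      simp only [hp', if_true]
      rw [ih, pvSeg_cons_neg hp']

-- ===== VERDICT (by name: the statement is the Claim_ definition above) =====
theorem get_heat_schedule_spec : Claim_equal_get_heat_schedule := by
  intro lines _
  unfold Spec_get_heat_schedule get_heat_schedule get_heat_schedule_alt
  rw [pv_fold_eq_loop, pvAltLoop_eq_pvSeg]
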